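-- pv_equiv track=rewrite | github.com/peter-stefunko/rpm2xkcd2347 | spdx_deps.py | get_duplicates
-- ===== SOURCE A (Python) =====
-- from collections import defaultdict
--
-- def get_duplicates(packages: dict[str, str]) -> dict[str, set[str]]:
--     duplicates: dict[str, set[str]] = defaultdict(set)
--
--     for spdx_id, name in packages.items():
--         for spdx_id2, name2 in packages.items():
--             if name == name2 and spdx_id != spdx_id2:
--                 if len(duplicates[name]) == 0:
--                     duplicates[name].add(spdx_id)
--                 duplicates[name].add(spdx_id2)
--
--     return duplicates
-- ===== SOURCE B (Python) =====
-- from collections import defaultdict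
--
-- def get_duplicates(packages: dict[str, str]) -> dict[str, set[str]]:
--     # One pass: group spdx_ids by name, then keep the names with more than one id.
--     index: dict[str, list[str]] = {}
--     for spdx_id, name in packages.items():
--         index.setdefault(name, []).append(spdx_id)
--
--     duplicates: dict[str, set[str]] = defaultdict(set)
--     for name, ids in index.items():
--         if len(ids) > 1:
--             duplicates[name] = set(ids)
--     return duplicates
-- ===== Notes on version B (the rewrite author's own statement) =====
-- stated objective: faster
-- what changed: Replaces the quadratic all-pairs rescan with a single pass that groups spdx_ids by name in a dict, then keeps the groups of size > 1.
import Mathlib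
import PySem

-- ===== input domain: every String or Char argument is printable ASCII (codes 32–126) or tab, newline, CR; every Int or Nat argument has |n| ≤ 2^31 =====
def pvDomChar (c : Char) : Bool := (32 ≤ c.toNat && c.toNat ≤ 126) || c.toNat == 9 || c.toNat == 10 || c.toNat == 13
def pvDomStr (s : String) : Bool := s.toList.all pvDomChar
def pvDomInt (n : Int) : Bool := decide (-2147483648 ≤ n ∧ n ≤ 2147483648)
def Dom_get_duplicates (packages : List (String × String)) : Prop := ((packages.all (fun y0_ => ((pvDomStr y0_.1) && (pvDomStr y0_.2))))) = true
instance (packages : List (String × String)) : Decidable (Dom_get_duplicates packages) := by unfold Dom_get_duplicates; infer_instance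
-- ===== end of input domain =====

-- B replaces A's quadratic all-pairs rescan by one grouping pass over the dict (faster).

-- ===== PORT A =====
def get_duplicates (packages : List (String × String)) : List (String × List String) :=
  let items := (PySem.Dict.ofList packages).items
  let dup : PySem.Dict String (PySem.Set String) :=
    items.foldl (fun d p =>
      items.foldl (fun d p2 =>
        if p.2 == p2.2 && p.1 != p2.1 then
          let s := d.getD p.2 PySem.Set.empty
          let s := if PySem.Set.len s == 0 then PySem.Set.add s p.1 else s
          let s := PySem.Set.add s p2.1
          d.insert p.2 s
        else d) d) PySem.Dict.empty
  dup.items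

-- ===== PORT B =====
def get_duplicates_alt (packages : List (String × String)) : List (String × List String) :=
  let items := (PySem.Dict.ofList packages).items
  let index : PySem.Dict String (List String) :=
    items.foldl (fun d p => d.modify p.2 [] (fun ids => ids ++ [p.1])) PySem.Dict.empty
  let dup : PySem.Dict String (PySem.Set String) :=
    index.items.foldl (fun r q =>
      if 1 < q.2.length then r.insert q.1 (PySem.Set.ofList q.2) else r) PySem.Dict.empty
  dup.items

-- ===== PRECONDITION & SPEC =====
def Spec_get_duplicates (packages : List (String × String)) (out : List (String × List String)) : Prop := out = get_duplicates_alt packages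
instance (packages : List (String × String)) (out : List (String × List String)) : Decidable (Spec_get_duplicates packages out) := by unfold Spec_get_duplicates; infer_instance

-- ===== CLAIM (what is proved, stated in full; the proofs are below) =====
def Claim_equal_get_duplicates : Prop := ∀ (packages : List (String × String)), Dom_get_duplicates packages → Spec_get_duplicates packages (get_duplicates packages)

-- ===== LEMMAS AND PROOFS =====

-- A's inner-loop body, named for the proofs (definitionally the lambda in the port)
def pvStepA (p : String × String) (d : PySem.Dict String (PySem.Set String))
    (p2 : String × String) : PySem.Dict String (PySem.Set String) :=
  if p.2 == p2.2 && p.1 != p2.1 then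
    let s := d.getD p.2 PySem.Set.empty
    let s := if PySem.Set.len s == 0 then PySem.Set.add s p.1 else s
    let s := PySem.Set.add s p2.1
    d.insert p.2 s
  else d

-- ids carrying a given name, in list order
def pvIds (l : List (String × String)) (n : String) : List String :=
  (l.filter (fun p => p.2 == n)).map (fun p => p.1)

-- the common value of both dicts after seeing the names `seen`
def pvPart (l : List (String × String)) (seen : List String) : List (String × List String) :=
  ((PySem.Set.ofList seen).filter (fun n => decide (1 < (pvIds l n).length))).map
    (fun n => (n, pvIds l n))

theorem pvIds_nodup (l : List (String × String)) (h : (l.map (fun x => x.1)).Nodup)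
    (n : String) : (pvIds l n).Nodup := by
  have hsub : (pvIds l n).Sublist (l.map (fun x => x.1)) :=
    List.Sublist.map _ List.filter_sublist
  exact h.sublist hsub

theorem pvIds_cons (q : String × String) (l : List (String × String)) (n : String) :
    pvIds (q :: l) n = if q.2 = n then q.1 :: pvIds l n else pvIds l n := by
  by_cases h : q.2 = n <;> simp [pvIds, h]

theorem pvIds_append (l1 l2 : List (String × String)) (n : String) :
    pvIds (l1 ++ l2) n = pvIds l1 n ++ pvIds l2 n := by
  simp [pvIds]

theorem pvIds_mem {l : List (String × String)} {p : String × String} (hp : p ∈ l) :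
    p.1 ∈ pvIds l p.2 :=
  List.mem_map.mpr ⟨p, List.mem_filter.mpr ⟨hp, by simp⟩, rfl⟩

theorem pvOneLt {α : Type} {xs : List α} {a b : α} (ha : a ∈ xs) (hb : b ∈ xs)
    (hne : a ≠ b) : 1 < xs.length := by
  cases xs with
  | nil => cases ha
  | cons x t =>
    cases t with
    | nil =>
      simp only [List.mem_singleton] at ha hb
      exact absurd (ha.trans hb.symm) hne
    | cons y u => simp only [List.length_cons]; omega

theorem pvFoldl_id {α β : Type} (l : List α) (f : β → α → β) (d : β) :
    (∀ x ∈ l, f d x = d) → l.foldl f d = d := by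
  induction l with
  | nil => intro _; rfl
  | cons x xs ih =>
    intro h
    rw [List.foldl_cons, h x (by simp)]
    exact ih (fun y hy => h y (by simp [hy]))

theorem pvPart_app_mem (l : List (String × String)) (seen : List String) (n : String)
    (hn : n ∈ seen) : pvPart l (seen ++ [n]) = pvPart l seen := by
  simp [pvPart, PySem.Set.ofList_append_singleton,
    PySem.Set.add_of_mem ((PySem.Set.mem_ofList seen n).mpr hn)]

theorem pvPart_app_short (l : List (String × String)) (seen : List String) (n : String)
    (hn : n ∉ seen) (hlen : ¬ 1 < (pvIds l n).length) :
    pvPart l (seen ++ [n]) = pvPart l seen := by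
  unfold pvPart
  rw [PySem.Set.ofList_append_singleton,
    PySem.Set.add_of_not_mem (fun hm => hn ((PySem.Set.mem_ofList _ _).mp hm)),
    List.filter_append, List.map_append]
  have h1 : List.filter (fun m => decide (1 < (pvIds l m).length)) [n] = [] := by
    simp [hlen]
  rw [h1]
  simp

theorem pvPart_app_long (l : List (String × String)) (seen : List String) (n : String)
    (hn : n ∉ seen) (hlen : 1 < (pvIds l n).length) :
    pvPart l (seen ++ [n]) = pvPart l seen ++ [(n, pvIds l n)] := by
  unfold pvPart
  rw [PySem.Set.ofList_append_singleton,
    PySem.Set.add_of_not_mem (fun hm => hn ((PySem.Set.mem_ofList _ _).mp hm)),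
    List.filter_append, List.map_append]
  have h1 : List.filter (fun m => decide (1 < (pvIds l m).length)) [n] = [n] := by
    simp [hlen]
  rw [h1]
  simp

theorem pvKeys_of_items (l : List (String × String)) (seen : List String)
    (d : PySem.Dict String (PySem.Set String)) (hd : d.items = pvPart l seen) :
    d.keys = (PySem.Set.ofList seen).filter (fun n => decide (1 < (pvIds l n).length)) := by
  simp only [PySem.Dict.keys, hd, pvPart, List.map_map]
  exact (List.map_congr_left (fun a _ => rfl)).trans (List.map_id _)

theorem pvInsertSelf {d : PySem.Dict String (PySem.Set String)} {n : String}
    {v : PySem.Set String} (hk : d.keys.Nodup) (hm : (n, v) ∈ d.items) :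
    d.insert n v = d := by
  apply PySem.Dict.ext
  have hc : d.contains n = true := (PySem.Dict.contains_iff_mem_keys d n).mpr (by
    simp only [PySem.Dict.keys]
    exact List.mem_map.mpr ⟨(n, v), hm, rfl⟩)
  rw [PySem.Dict.items_insert_of_contains d v hc]
  have hpt : ∀ q ∈ d.items, (if (q.1 == n) = true then (n, v) else q) = q := by
    intro q hq
    by_cases h : q.1 = n
    · have h1 : d.get? q.1 = some q.2 := PySem.Dict.get?_of_mem_items d (by
        rw [show (q.1, q.2) = q from rfl]; exact hq) hk
      have h2 : d.get? n = some v := PySem.Dict.get?_of_mem_items d hm hk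
      rw [h, h2] at h1
      have hv : v = q.2 := Option.some.inj h1
      rw [if_pos (by simp [h]), hv, ← h]
    · simp [h]
  exact (List.map_congr_left hpt).trans (List.map_id _)

-- inner loop over a fresh name: builds the full id set in order
theorem pvInnerFresh (p : String × String) (d : PySem.Dict String (PySem.Set String))
    (hc : d.contains p.2 = false) :
    ∀ (suf : List (String × String)) (t : List String),
      (p.1 :: (t ++ pvIds suf p.2)).Nodup →
      suf.foldl (pvStepA p) (if t = [] then d else d.insert p.2 (p.1 :: t)) =
        (if t ++ pvIds suf p.2 = [] then d else d.insert p.2 (p.1 :: (t ++ pvIds suf p.2))) := by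
  intro suf
  induction suf with
  | nil => intro t h; simp [pvIds]
  | cons q rest ih =>
    intro t h
    rw [List.foldl_cons]
    by_cases hq : q.2 = p.2
    · have hids : pvIds (q :: rest) p.2 = q.1 :: pvIds rest p.2 := by
        simp [pvIds_cons, hq]
      rw [hids] at h ⊢
      have hq1 : q.1 ∉ p.1 :: t := by
        intro hmem
        rcases List.mem_cons.mp hmem with he | ht
        · have hnm := (List.nodup_cons.mp h).1
          have hin : p.1 ∈ q.1 :: pvIds rest p.2 := by rw [he]; exact List.mem_cons_self
          exact hnm (List.mem_append.mpr (Or.inr hin))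
        · have h2 := (List.nodup_cons.mp h).2
          exact (List.disjoint_of_nodup_append h2) ht List.mem_cons_self
      have hpq : p.1 ≠ q.1 := fun e => hq1 (by rw [← e]; exact List.mem_cons_self)
      have hcond : (p.2 == q.2 && p.1 != q.1) = true := by
        simp [hq, bne_iff_ne, hpq]
      have hstep : pvStepA p (if t = [] then d else d.insert p.2 (p.1 :: t)) q
          = d.insert p.2 (p.1 :: (t ++ [q.1])) := by
        by_cases ht : t = []
        · have hgd : d.getD p.2 ([] : PySem.Set String) = [] :=
            PySem.Dict.getD_of_not_contains d _ hc
          have ha2 : PySem.Set.add ([p.1] : PySem.Set String) q.1 = [p.1] ++ [q.1] :=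
            PySem.Set.add_of_not_mem (by
              intro hm
              exact hpq (List.mem_singleton.mp hm).symm)
          simp [pvStepA, hcond, ht, hgd, ha2, PySem.Set.len]
        · have hgd : (d.insert p.2 (p.1 :: t)).getD p.2 ([] : PySem.Set String) = p.1 :: t :=
            PySem.Dict.getD_insert_self d p.2 (p.1 :: t) []
          have ha : PySem.Set.add ((p.1 :: t) : PySem.Set String) q.1 = (p.1 :: t) ++ [q.1] :=
            PySem.Set.add_of_not_mem hq1
          simp [pvStepA, hcond, ht, hgd, ha, PySem.Dict.insert_insert_self]
      rw [hstep]
      have h' : (p.1 :: ((t ++ [q.1]) ++ pvIds rest p.2)).Nodup := by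
        rw [List.append_assoc, List.singleton_append]; exact h
      have hr := ih (t ++ [q.1]) h'
      rw [if_neg (by simp : ¬ (t ++ [q.1] = []))] at hr
      rw [hr]
      have hne1 : ¬ ((t ++ [q.1]) ++ pvIds rest p.2 = []) := by simp
      have hne2 : ¬ (t ++ q.1 :: pvIds rest p.2 = []) := by simp
      rw [if_neg hne1, if_neg hne2, List.append_assoc, List.singleton_append]
    · have hids : pvIds (q :: rest) p.2 = pvIds rest p.2 := by
        simp [pvIds_cons, hq]
      rw [hids] at h ⊢
      have hq' : p.2 ≠ q.2 := fun e => hq (Eq.symm e)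
      have hstep : ∀ X, pvStepA p X q = X := by
        intro X
        simp [pvStepA, hq']
      rw [hstep]
      exact ih t h

-- one outer iteration: processing p extends the seen names by p.2
theorem pvInnerStep (l pre suf : List (String × String)) (p : String × String)
    (hl : l = pre ++ p :: suf) (hnd : (l.map (fun x => x.1)).Nodup)
    (d : PySem.Dict String (PySem.Set String))
    (hd : d.items = pvPart l (pre.map (fun x => x.2))) :
    (l.foldl (pvStepA p) d).items = pvPart l (pre.map (fun x => x.2) ++ [p.2]) := by
  have hkeys := pvKeys_of_items l (pre.map (fun x => x.2)) d hd
  have hknd : d.keys.Nodup := by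
    rw [hkeys]
    exact (PySem.Set.nodup_ofList _).filter _
  have hpmem : p ∈ l := by rw [hl]; simp
  have hpid : p.1 ∈ pvIds l p.2 := pvIds_mem hpmem
  by_cases hlen : 1 < (pvIds l p.2).length
  · by_cases hseen : p.2 ∈ pre.map (fun x => x.2)
    · -- name already handled: the fold is a no-op
      have hmem_items : (p.2, pvIds l p.2) ∈ d.items := by
        rw [hd]
        exact List.mem_map.mpr ⟨p.2, List.mem_filter.mpr
          ⟨(PySem.Set.mem_ofList _ _).mpr hseen, by simpa using hlen⟩, rfl⟩
      have hgetD : d.getD p.2 ([] : PySem.Set String) = pvIds l p.2 :=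
        PySem.Dict.getD_of_mem_items d hmem_items hknd []
      have hnil : pvIds l p.2 ≠ [] := List.ne_nil_of_mem hpid
      have hfold : l.foldl (pvStepA p) d = d := by
        apply pvFoldl_id
        intro p2 hp2
        by_cases hcond : (p.2 == p2.2 && p.1 != p2.1) = true
        · obtain ⟨he, hne⟩ : p.2 = p2.2 ∧ p.1 ≠ p2.1 := by
            simpa [bne_iff_ne] using hcond
          have hp2id : p2.1 ∈ pvIds l p.2 := by
            have hmm := pvIds_mem hp2
            rwa [← he] at hmm
          have hadd : PySem.Set.add (pvIds l p.2) p2.1 = pvIds l p.2 :=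
            PySem.Set.add_of_mem hp2id
          have hins : d.insert p.2 (pvIds l p.2) = d := pvInsertSelf hknd hmem_items
          simp [pvStepA, hcond, hgetD, hnil, hadd, hins]
        · simp [pvStepA, hcond]
      rw [hfold, pvPart_app_mem _ _ _ hseen]
      exact hd
    · -- fresh name: the fold inserts the full id list
      have hcont : d.contains p.2 = false := by
        cases hcb : d.contains p.2
        · rfl
        · exfalso
          have hmk := (PySem.Dict.contains_iff_mem_keys d p.2).mp hcb
          rw [hkeys] at hmk
          exact hseen ((PySem.Set.mem_ofList _ _).mp (List.mem_of_mem_filter hmk))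
      have hpre_ids : pvIds pre p.2 = [] := by
        rw [pvIds, List.map_eq_nil_iff, List.filter_eq_nil_iff]
        intro a ha hsnd
        have ha2 : a.2 = p.2 := by simpa using hsnd
        exact hseen (by rw [← ha2]; exact List.mem_map.mpr ⟨a, ha, rfl⟩)
      have hids : pvIds l p.2 = p.1 :: pvIds suf p.2 := by
        rw [hl, pvIds_append, hpre_ids, pvIds_cons]
        simp
      conv_lhs => rw [hl]
      rw [List.foldl_append, List.foldl_cons]
      have hpre_fold : pre.foldl (pvStepA p) d = d := by
        apply pvFoldl_id
        intro q hq
        have hq2 : q.2 ≠ p.2 := fun e => hseen (by rw [← e]; exact List.mem_map.mpr ⟨q, hq, rfl⟩)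
        simp [pvStepA, Ne.symm hq2]
      rw [hpre_fold]
      have hstep_p : pvStepA p d p = d := by
        simp [pvStepA]
      rw [hstep_p]
      have hnodup_ids : (p.1 :: (([] : List String) ++ pvIds suf p.2)).Nodup := by
        have := pvIds_nodup l hnd p.2
        rw [hids] at this
        simpa using this
      have htail : pvIds suf p.2 ≠ [] := by
        intro e
        rw [hids, e] at hlen
        simp at hlen
      have hfold := pvInnerFresh p d hcont suf [] hnodup_ids
      rw [if_pos rfl] at hfold
      rw [List.nil_append] at hfold
      rw [if_neg htail] at hfold
      rw [hfold, ← hids, PySem.Dict.items_insert_of_not_contains d _ hcont, hd,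
        pvPart_app_long l _ p.2 hseen hlen]
  · -- the name is not duplicated: nothing ever fires
    have hfold : l.foldl (pvStepA p) d = d := by
      apply pvFoldl_id
      intro p2 hp2
      by_cases hcond : (p.2 == p2.2 && p.1 != p2.1) = true
      · exfalso
        obtain ⟨he, hne⟩ : p.2 = p2.2 ∧ p.1 ≠ p2.1 := by
          simpa [bne_iff_ne] using hcond
        have hp2id : p2.1 ∈ pvIds l p.2 := by
          have hmm := pvIds_mem hp2
          rwa [← he] at hmm
        exact hlen (pvOneLt hp2id hpid (fun e => hne (Eq.symm e)))
      · simp [pvStepA, hcond]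
    rw [hfold]
    by_cases hseen : p.2 ∈ pre.map (fun x => x.2)
    · rw [pvPart_app_mem _ _ _ hseen]; exact hd
    · rw [pvPart_app_short _ _ _ hseen hlen]; exact hd

theorem pvOuter (l : List (String × String)) (hnd : (l.map (fun x => x.1)).Nodup) :
    ∀ (suf pre : List (String × String)) (d : PySem.Dict String (PySem.Set String)),
      l = pre ++ suf → d.items = pvPart l (pre.map (fun x => x.2)) →
      (suf.foldl (fun d p => l.foldl (pvStepA p) d) d).items
        = pvPart l ((pre ++ suf).map (fun x => x.2)) := by
  intro suf
  induction suf with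
  | nil =>
    intro pre d hl hd
    simpa using hd
  | cons p suf ih =>
    intro pre d hl hd
    rw [List.foldl_cons]
    have hinner := pvInnerStep l pre suf p hl hnd d hd
    have hr := ih (pre ++ [p]) (l.foldl (pvStepA p) d)
      (by rw [hl]; simp) (by simpa using hinner)
    simpa using hr

theorem pvA (l : List (String × String)) (hnd : (l.map (fun x => x.1)).Nodup) :
    (l.foldl (fun d p => l.foldl (pvStepA p) d) PySem.Dict.empty).items
      = pvPart l (l.map (fun x => x.2)) := by
  have h := pvOuter l hnd l [] PySem.Dict.empty (by simp) rfl
  simpa using h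

-- B's second loop: keep the groups of size > 1
theorem pvFoldB : ∀ (qs : List (String × List String)) (r : PySem.Dict String (PySem.Set String)),
    (∀ q ∈ qs, r.contains q.1 = false) → (qs.map (fun q => q.1)).Nodup →
    (qs.foldl (fun r q => if 1 < q.2.length then r.insert q.1 (PySem.Set.ofList q.2) else r) r).items
      = r.items ++ (qs.filter (fun q => decide (1 < q.2.length))).map
          (fun q => (q.1, PySem.Set.ofList q.2)) := by
  intro qs
  induction qs with
  | nil => intro r _ _; simp
  | cons q rest ih =>
    intro r hfresh hnd
    rw [List.foldl_cons, List.filter_cons]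
    have hnd' : (rest.map (fun q => q.1)).Nodup := by
      rw [List.map_cons] at hnd
      exact (List.nodup_cons.mp hnd).2
    have hq1 : q.1 ∉ rest.map (fun q => q.1) := by
      rw [List.map_cons] at hnd
      exact (List.nodup_cons.mp hnd).1
    by_cases h : 1 < q.2.length
    · rw [if_pos h]
      have hfr : ∀ q' ∈ rest, (r.insert q.1 (PySem.Set.ofList q.2)).contains q'.1 = false := by
        intro q' hq'
        rw [PySem.Dict.contains_insert]
        have hne : q'.1 ≠ q.1 := fun e => hq1 (e ▸ List.mem_map.mpr ⟨q', hq', rfl⟩)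
        simp [hne, hfresh q' (by simp [hq'])]
      rw [ih _ hfr hnd',
        PySem.Dict.items_insert_of_not_contains r _ (hfresh q (by simp))]
      simp [h]
    · rw [if_neg h]
      rw [ih _ (fun q' hq' => hfresh q' (by simp [hq'])) hnd']
      simp [h]

theorem pvB (l : List (String × String)) (hnd : (l.map (fun x => x.1)).Nodup) :
    (((l.foldl (fun d p => d.modify p.2 [] (fun ids => ids ++ [p.1])) PySem.Dict.empty).items).foldl
        (fun r q => if 1 < q.2.length then r.insert q.1 (PySem.Set.ofList q.2) else r)
        PySem.Dict.empty).items
      = pvPart l (l.map (fun x => x.2)) := by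
  have hkeys : (l.foldl (fun d p => d.modify p.2 [] (fun ids => ids ++ [p.1]))
      PySem.Dict.empty).keys = PySem.Set.ofList (l.map (fun x => x.2)) := by
    have hk := PySem.Dict.keys_foldl_modify_key l (fun p => p.2) []
      (fun _ p => fun ids => ids ++ [p.1]) PySem.Dict.empty
    rw [PySem.Dict.keys_empty] at hk
    exact hk
  have hknd : (l.foldl (fun d p => d.modify p.2 [] (fun ids => ids ++ [p.1]))
      PySem.Dict.empty).keys.Nodup :=
    PySem.Dict.nodup_keys_foldl_modify_key l (fun p => p.2) []
      (fun _ p => fun ids => ids ++ [p.1]) PySem.Dict.empty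
      (by rw [PySem.Dict.keys_empty]; exact List.nodup_nil)
  have hget : ∀ n, (l.foldl (fun d p => d.modify p.2 [] (fun ids => ids ++ [p.1]))
      PySem.Dict.empty).getD n [] = pvIds l n := by
    intro n
    have h1 : (l.foldl (fun d p => d.modify p.2 [] (fun ids => ids ++ [p.1]))
        PySem.Dict.empty)
        = List.foldl (fun d q => d.modify q.1 [] (fun ids => ids ++ [q.2]))
            PySem.Dict.empty (l.map (fun p => (p.2, p.1))) := by
      rw [List.foldl_map]
    rw [h1, PySem.Dict.getD_foldl_modify_append, PySem.Dict.getD_empty]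
    simp [pvIds, List.filter_map, List.map_map, Function.comp_def]
  have hitems : (l.foldl (fun d p => d.modify p.2 [] (fun ids => ids ++ [p.1]))
      PySem.Dict.empty).items
      = (PySem.Set.ofList (l.map (fun x => x.2))).map (fun n => (n, pvIds l n)) := by
    rw [PySem.Dict.items_eq_map_keys _ hknd [], hkeys]
    exact List.map_congr_left (fun n _ => by rw [hget n])
  rw [hitems]
  rw [pvFoldB _ PySem.Dict.empty (fun q _ => PySem.Dict.contains_empty q.1)
    (by simp [List.map_map, Function.comp_def, PySem.Set.nodup_ofList])]
  rw [List.filter_map, List.map_map]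
  have hcongr : ∀ n ∈ (PySem.Set.ofList (l.map (fun x => x.2))).filter
      ((fun q : String × List String => decide (1 < q.2.length)) ∘ (fun n => (n, pvIds l n))),
      ((fun q : String × List String => (q.1, PySem.Set.ofList q.2)) ∘
        (fun n => (n, pvIds l n))) n = (fun n => (n, pvIds l n)) n := by
    intro n _
    simp only [Function.comp_apply]
    rw [PySem.Set.ofList_eq_self_of_nodup _ (pvIds_nodup l hnd n)]
  rw [List.map_congr_left hcongr]
  show ([] : List (String × List String)) ++ _ = _
  rw [List.nil_append, pvPart]
  rfl

-- ===== VERDICT (by name: the statement is the Claim_ definition above) =====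
theorem get_duplicates_spec : Claim_equal_get_duplicates := by
  intro packages _
  unfold Spec_get_duplicates
  have hnd : (((PySem.Dict.ofList packages).items).map (fun x => x.1)).Nodup := by
    have h := PySem.Dict.nodup_keys_ofList (ν := String) packages
    simpa [PySem.Dict.keys] using h
  have hA : get_duplicates packages
      = (((PySem.Dict.ofList packages).items).foldl
          (fun d p => ((PySem.Dict.ofList packages).items).foldl (pvStepA p) d)
          PySem.Dict.empty).items := rfl
  have hB : get_duplicates_alt packages
      = ((((PySem.Dict.ofList packages).items).foldl
            (fun d p => d.modify p.2 [] (fun ids => ids ++ [p.1])) PySem.Dict.empty).items.foldl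
          (fun r q => if 1 < q.2.length then r.insert q.1 (PySem.Set.ofList q.2) else r)
          PySem.Dict.empty).items := rfl
  rw [hA, hB, pvA _ hnd, pvB _ hnd]
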